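-- pv_equiv track=rewrite | github.com/P79N6A/gecko-dev-comments-removed | dom/canvas/test/webgl-conformance/generate-wrappers-and-manifest.py | WrapWithIndent
-- ===== SOURCE A (Python) =====
-- def WrapWithIndent(lines, indentLen):
--   split = lines.split('\n')
--   if len(split) == 1:
--       return lines
--
--   ret = [split[0]]
--   indentSpaces = ' ' * indentLen
--   for line in split[1:]:
--       ret.append(indentSpaces + line)
--
--   return '\n'.join(ret)
-- ===== SOURCE B (Python) =====
-- def WrapWithIndent(lines, indentLen):
--   if '\n' not in lines:
--       return lines
--   return lines.replace('\n', '\n' + ' ' * indentLen)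
-- ===== Notes on version B (the rewrite author's own statement) =====
-- stated objective: idiomatic
-- what changed: Replaces the split-into-list / explicit append loop / rejoin with a membership guard plus a single string substitution of every newline by newline-plus-indent.
import Mathlib
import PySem

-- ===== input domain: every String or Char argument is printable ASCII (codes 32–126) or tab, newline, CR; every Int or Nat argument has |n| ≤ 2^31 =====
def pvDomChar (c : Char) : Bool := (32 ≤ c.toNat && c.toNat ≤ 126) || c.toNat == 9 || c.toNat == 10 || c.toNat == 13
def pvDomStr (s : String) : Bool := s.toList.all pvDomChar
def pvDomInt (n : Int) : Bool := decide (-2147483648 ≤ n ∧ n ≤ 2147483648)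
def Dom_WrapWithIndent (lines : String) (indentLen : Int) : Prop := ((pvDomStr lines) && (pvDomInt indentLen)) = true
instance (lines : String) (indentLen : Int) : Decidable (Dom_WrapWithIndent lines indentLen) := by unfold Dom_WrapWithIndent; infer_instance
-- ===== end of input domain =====

-- B replaces A's split / first-line guard / append loop / rejoin by one substitution of
-- every '\n' with '\n' + indent; same result, same cost (objective: idiomatic).

-- ===== PORT A =====
def WrapWithIndent (lines : String) (indentLen : Int) : String :=
  let split := PySem.Chars.splitOn lines.toList ['\n']
  if split.length == 1 then lines
  else
    match split with
    | [] => lines  -- unreachable: str.split with a nonempty separator never returns []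
    | s0 :: rest =>
      let indentSpaces := PySem.List.pyRepeat [' '] indentLen
      let ret := rest.foldl (fun r line => r ++ [indentSpaces ++ line]) [s0]
      String.ofList (PySem.Chars.join ['\n'] ret)

-- ===== PORT B =====
def WrapWithIndent_alt (lines : String) (indentLen : Int) : String :=
  if PySem.Str.isIn "\n" lines = false then lines
  else PySem.Str.replace lines "\n" (String.ofList ('\n' :: PySem.List.pyRepeat [' '] indentLen))

-- ===== PRECONDITION & SPEC =====
def Spec_WrapWithIndent (lines : String) (indentLen : Int) (out : String) : Prop := out = WrapWithIndent_alt lines indentLen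
instance (lines : String) (indentLen : Int) (out : String) : Decidable (Spec_WrapWithIndent lines indentLen out) := by unfold Spec_WrapWithIndent; infer_instance

-- ===== CLAIM (what is proved, stated in full; the proofs are below) =====
def Claim_equal_WrapWithIndent : Prop := ∀ (lines : String) (indentLen : Int), Dom_WrapWithIndent lines indentLen → Spec_WrapWithIndent lines indentLen (WrapWithIndent lines indentLen)

-- ===== LEMMAS AND PROOFS =====

-- spec function: f ind s = s with every '\n' followed by ind
def pvF (ind : List Char) : List Char → List Char
  | [] => []
  | c :: t => if c = '\n' then '\n' :: (ind ++ pvF ind t) else c :: pvF ind t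

-- spec of splitOn on '\n': g pre s = the lines of s, the first prefixed with pre
def pvG (pre : List Char) : List Char → List (List Char)
  | [] => [pre]
  | c :: t => if c = '\n' then pre :: pvG [] t else pvG (pre ++ [c]) t

theorem pvG_ne_nil (pre s : List Char) : pvG pre s ≠ [] := by
  induction s generalizing pre with
  | nil => simp [pvG]
  | cons c t ih => by_cases h : c = '\n' <;> simp [pvG, h] <;> exact ih _

theorem replace_go_eq (ind : List Char) (fuel : Nat) (s acc : List Char)
    (h : s.length ≤ fuel) :
    PySem.Chars.replace.go ['\n'] ('\n' :: ind) fuel s acc = acc.reverse ++ pvF ind s := by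
  induction fuel generalizing s acc with
  | zero =>
    interval_cases hs : s.length
    · cases s with
      | nil => simp [PySem.Chars.replace.go, pvF]
      | cons c t => simp at hs
  | succ n ih =>
    cases s with
    | nil => simp [PySem.Chars.replace.go, pvF]
    | cons c t =>
      by_cases hc : c = '\n'
      · subst hc
        rw [show PySem.Chars.replace.go ['\n'] ('\n' :: ind) (n+1) ('\n' :: t) acc
            = PySem.Chars.replace.go ['\n'] ('\n' :: ind) n (List.drop 1 ('\n' :: t)) (('\n' :: ind).reverse ++ acc) from by
          simp [PySem.Chars.replace.go, List.isPrefixOf]]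
        rw [ih _ _ (by simpa using Nat.le_of_succ_le_succ h)]
        simp [pvF]
      · rw [show PySem.Chars.replace.go ['\n'] ('\n' :: ind) (n+1) (c :: t) acc
            = PySem.Chars.replace.go ['\n'] ('\n' :: ind) n t (c :: acc) from by
          simp [PySem.Chars.replace.go, List.isPrefixOf, Ne.symm hc]]
        rw [ih _ _ (by simpa using Nat.le_of_succ_le_succ h)]
        simp [pvF, hc]

theorem replace_eq_pvF (ind s : List Char) :
    PySem.Chars.replace s ['\n'] ('\n' :: ind) = pvF ind s := by
  rw [PySem.Chars.replace, if_neg (by simp)]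
  exact replace_go_eq ind s.length s [] le_rfl

theorem splitOn_go_eq (fuel : Nat) (s cur : List Char) (acc : List (List Char))
    (h : s.length < fuel) :
    PySem.Chars.splitOn.go ['\n'] fuel s cur acc = acc.reverse ++ pvG cur.reverse s := by
  induction fuel generalizing s cur acc with
  | zero => omega
  | succ n ih =>
    cases s with
    | nil => simp [PySem.Chars.splitOn.go, pvG]
    | cons c t =>
      by_cases hc : c = '\n'
      · subst hc
        rw [show PySem.Chars.splitOn.go ['\n'] (n+1) ('\n' :: t) cur acc
            = PySem.Chars.splitOn.go ['\n'] n (List.drop 1 ('\n' :: t)) [] (cur.reverse :: acc) from by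
          simp [PySem.Chars.splitOn.go, List.isPrefixOf]]
        rw [ih _ _ _ (by simpa using Nat.lt_of_succ_lt_succ h)]
        simp [pvG]
      · rw [show PySem.Chars.splitOn.go ['\n'] (n+1) (c :: t) cur acc
            = PySem.Chars.splitOn.go ['\n'] n t (c :: cur) acc from by
          simp [PySem.Chars.splitOn.go, List.isPrefixOf, Ne.symm hc]]
        rw [ih _ _ _ (by simpa using Nat.lt_of_succ_lt_succ h)]
        simp [pvG, hc]

theorem splitOn_eq_pvG (s : List Char) :
    PySem.Chars.splitOn s ['\n'] = pvG [] s := by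
  rw [PySem.Chars.splitOn]
  have := splitOn_go_eq (s.length + 1) s [] [] (by omega)
  simpa using this

-- length-1 split means no newline, and then pvF is the identity
theorem pvG_length_one (pre s : List Char) (h : (pvG pre s).length = 1) : '\n' ∉ s := by
  induction s generalizing pre with
  | nil => simp
  | cons c t ih =>
    by_cases hc : c = '\n'
    · subst hc
      exfalso
      simp only [pvG, if_pos rfl, List.length_cons] at h
      have := pvG_ne_nil ([] : List Char) t
      cases hg : pvG [] t with
      | nil => exact this hg
      | cons a b => rw [hg] at h; simp at h
    · simp only [pvG, if_neg hc] at h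
      simp [Ne.symm hc, ih _ h]

-- the A-side join over pvG equals pvF
theorem intercalate_newline (p : List Char) (ps : List (List Char)) :
    List.intercalate ['\n'] (p :: ps) = p ++ ps.flatMap (fun q => '\n' :: q) := by
  induction ps generalizing p with
  | nil => simp [List.intercalate]
  | cons q qs ih =>
    rw [show List.intercalate ['\n'] (p :: q :: qs)
        = p ++ ['\n'] ++ List.intercalate ['\n'] (q :: qs) from by
      simp [List.intercalate, List.intersperse]]
    rw [ih]
    simp

theorem flatMap_ind (ind : List Char) (ps : List (List Char)) (h : ps ≠ []) :
    ps.flatMap (fun q => '\n' :: (ind ++ q))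
      = '\n' :: ind ++ List.intercalate ['\n'] (ps.headI :: ps.tail.map (fun q => ind ++ q)) := by
  cases ps with
  | nil => exact absurd rfl h
  | cons q qs =>
    rw [List.headI_cons, List.tail_cons, intercalate_newline]
    simp [List.flatMap_map]

theorem pvG_newline (pre t : List Char) : pvG pre ('\n' :: t) = pre :: pvG [] t := by
  simp [pvG]

theorem join_pvG (ind pre s : List Char) :
    List.intercalate ['\n'] ((pvG pre s).headI :: ((pvG pre s).tail.map (fun q => ind ++ q)))
      = pre ++ pvF ind s := by
  induction s generalizing pre with
  | nil => simp [pvG, pvF, List.intercalate]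
  | cons c t ih =>
    by_cases hc : c = '\n'
    · subst hc
      rw [pvG_newline, List.headI_cons, List.tail_cons, intercalate_newline]
      have hmap : ((pvG ([] : List Char) t).map (fun q => ind ++ q)).flatMap (fun q => '\n' :: q)
          = (pvG ([] : List Char) t).flatMap (fun q => '\n' :: (ind ++ q)) := by
        simp [List.flatMap_map]
      rw [hmap, flatMap_ind ind _ (pvG_ne_nil _ _), ih []]
      simp [pvF]
    · simp only [pvG, if_neg hc, pvF, if_neg hc]
      rw [ih (pre ++ [c])]
      simp

-- the foldl in A's port builds [s0] ++ rest.map (ind ++ ·)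
theorem foldl_append_map (ind : List Char) (rest : List (List Char)) (init : List (List Char)) :
    rest.foldl (fun r line => r ++ [ind ++ line]) init = init ++ rest.map (fun q => ind ++ q) := by
  induction rest generalizing init with
  | nil => simp
  | cons q qs ih => simp [ih]

theorem pvG_length_one_of_no_newline (pre s : List Char) (h : '\n' ∉ s) :
    (pvG pre s).length = 1 := by
  induction s generalizing pre with
  | nil => simp [pvG]
  | cons c t ih =>
    simp only [List.mem_cons, not_or] at h
    simp [pvG, if_neg (Ne.symm h.1), ih _ h.2]

theorem isIn_newline (lines : String) :
    PySem.Str.isIn "\n" lines = true ↔ '\n' ∈ lines.toList := by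
  rw [show PySem.Str.isIn "\n" lines = PySem.Chars.isIn "\n".toList lines.toList from
    PySem.Str.isIn_eq ..]
  rw [PySem.Chars.isIn_iff_infix]
  exact List.singleton_infix_iff '\n' lines.toList

-- ===== VERDICT (by name: the statement is the Claim_ definition above) =====
theorem WrapWithIndent_spec : Claim_equal_WrapWithIndent := by
  intro lines indentLen _
  unfold Spec_WrapWithIndent WrapWithIndent WrapWithIndent_alt
  set ind := PySem.List.pyRepeat [' '] indentLen with hind
  have hB : PySem.Str.replace lines "\n" (String.ofList ('\n' :: ind)) = String.ofList (pvF ind lines.toList) := by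
    have h1 : (PySem.Str.replace lines "\n" (String.ofList ('\n' :: ind))).toList
        = PySem.Chars.replace lines.toList "\n".toList (String.ofList ('\n' :: ind)).toList :=
      PySem.Str.toList_replace ..
    have h2 : "\n".toList = ['\n'] := rfl
    have h3 : (String.ofList ('\n' :: ind)).toList = '\n' :: ind := String.toList_ofList
    rw [h2, h3, replace_eq_pvF] at h1
    calc PySem.Str.replace lines "\n" (String.ofList ('\n' :: ind))
        = String.ofList (PySem.Str.replace lines "\n" (String.ofList ('\n' :: ind))).toList :=
          String.ofList_toList.symm
      _ = String.ofList (pvF ind lines.toList) := by rw [h1]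
  rw [splitOn_eq_pvG]
  by_cases hlen : (pvG [] lines.toList).length = 1
  · have hnn : '\n' ∉ lines.toList := pvG_length_one [] lines.toList hlen
    have hin : PySem.Str.isIn "\n" lines = false := by
      rw [← Bool.not_eq_true, isIn_newline]; exact hnn
    simp only [hlen, beq_self_eq_true, if_pos, hin, if_true]
  · have hin : PySem.Str.isIn "\n" lines = true := by
      rw [isIn_newline]
      by_contra hnn
      exact hlen (pvG_length_one_of_no_newline [] lines.toList hnn)
    rw [hin]
    simp only [beq_iff_eq, hlen, if_neg, ite_false, Bool.true_eq_false]
    rw [hB]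
    cases hg : pvG [] lines.toList with
    | nil => exact absurd hg (pvG_ne_nil _ _)
    | cons s0 rest =>
      simp only []
      rw [foldl_append_map]
      have := join_pvG ind [] lines.toList
      rw [hg] at this
      simp only [List.headI, List.tail, List.nil_append] at this
      rw [show PySem.Chars.join ['\n'] ([s0] ++ rest.map (fun q => ind ++ q))
          = List.intercalate ['\n'] (s0 :: rest.map (fun q => ind ++ q)) from rfl]
      rw [this]
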